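-- pv_equiv track=rewrite | github.com/ProgrammerApasionated/python-portfolio | ProgramaRepasoExamen6.py | racha_aprobados
-- ===== SOURCE A (Python) =====
-- def racha_aprobados(nota):
--     inicio = 0
--     final = -1
--     longitud = 0
--     max_inicio = -1
--     max_longitud = 0
--     i = 0
--     while i < len(nota):
--         if nota[i] >= 5:
--             if inicio == 0:
--                 inicio = i
--             longitud += 1
--             final = i + 1
--             i += 1
--         else:
--             if longitud > max_longitud:
--                 max_inicio = inicio
--                 max_longitud = longitud
--                 final = i + 1
--             longitud = 0
--             i += 1
--     if longitud > max_longitud: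
--         max_inicio = inicio
--         max_longitud = longitud
--     # Tenemos el inicio de la racha más alta y el final también pero no lo utilizamos
--     return max_longitud
-- ===== SOURCE B (Python) =====
-- def racha_aprobados(nota):
--     # boundary-gap formulation: longest passing run = max gap between consecutive
--     # failing positions (with virtual fails at -1 and len(nota)) minus 1
--     fails = [-1] + [i for i, x in enumerate(nota) if x < 5] + [len(nota)]
--     return max(b - a - 1 for a, b in zip(fails, fails[1:]))
-- ===== Notes on version B (the rewrite author's own statement) =====
-- stated objective: alternative
-- what changed: Replaces A's per-element run-tracking state machine (inicio/longitud/max_longitud) by a boundary-gap computation: collect the indices of failing grades, pad with -1 and len(nota), and return the maximum gap between consecutive boundaries minus 1.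
import Mathlib
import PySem

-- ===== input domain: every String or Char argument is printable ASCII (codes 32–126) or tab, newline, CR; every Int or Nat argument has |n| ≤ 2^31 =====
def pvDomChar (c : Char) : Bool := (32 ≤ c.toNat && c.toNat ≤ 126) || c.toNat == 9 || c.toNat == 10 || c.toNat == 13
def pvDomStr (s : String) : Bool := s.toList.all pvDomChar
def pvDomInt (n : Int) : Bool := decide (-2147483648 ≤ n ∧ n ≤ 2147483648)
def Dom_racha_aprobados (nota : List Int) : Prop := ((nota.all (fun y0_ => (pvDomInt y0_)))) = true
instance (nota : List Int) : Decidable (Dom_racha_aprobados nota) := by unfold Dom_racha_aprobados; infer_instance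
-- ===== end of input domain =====

-- B replaces A's per-element run-tracking state machine by a boundary-gap computation
-- over the failing indices (same cost, different algorithm).

-- ===== PORT A =====
-- literal transliteration of A's while-loop, carrying every Python variable
def rachaLoopA (nota : List Int) (i : Nat)
    (inicio final longitud max_inicio max_longitud : Int) : Int :=
  if h : i < nota.length then
    if nota[i] ≥ 5 then
      rachaLoopA nota (i + 1) (if inicio = 0 then (i : Int) else inicio)
        ((i : Int) + 1) (longitud + 1) max_inicio max_longitud
    else
      if longitud > max_longitud then
        rachaLoopA nota (i + 1) inicio ((i : Int) + 1) 0 inicio longitud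
      else
        rachaLoopA nota (i + 1) inicio final 0 max_inicio max_longitud
  else
    if longitud > max_longitud then longitud else max_longitud
termination_by nota.length - i
decreasing_by all_goals omega

def racha_aprobados (nota : List Int) : Int :=
  rachaLoopA nota 0 0 (-1) 0 (-1) 0

-- ===== PORT B =====
def racha_aprobados_alt (nota : List Int) : Int :=
  let fails : List Int :=
    -1 :: (((PySem.List.enumerate nota 0).filterMap
              (fun p => if p.2 < 5 then some p.1 else none)) ++ [(nota.length : Int)])
  let gaps := (fails.zip fails.tail).map (fun p => p.2 - p.1 - 1)
  match gaps with
  | [] => 0            -- unreachable: fails always has at least two elements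
  | g :: gs => gs.foldl max g

-- ===== PRECONDITION & SPEC =====
def Spec_racha_aprobados (nota : List Int) (out : Int) : Prop := out = racha_aprobados_alt nota
instance (nota : List Int) (out : Int) : Decidable (Spec_racha_aprobados nota out) := by unfold Spec_racha_aprobados; infer_instance

-- ===== CLAIM (what is proved, stated in full; the proofs are below) =====
def Claim_equal_racha_aprobados : Prop := ∀ (nota : List Int), Dom_racha_aprobados nota → Spec_racha_aprobados nota (racha_aprobados nota)

-- ===== LEMMAS AND PROOFS =====

-- canonical run-length fold both ports are reduced to
def gRun : List Int → Int → Int → Int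
  | [], l, m => if l > m then l else m
  | x :: xs, l, m => if x ≥ 5 then gRun xs (l + 1) m else gRun xs 0 (if l > m then l else m)

-- failing indices starting at offset `off`
def idxs : Int → List Int → List Int
  | _, [] => []
  | off, x :: xs => if x < 5 then off :: idxs (off + 1) xs else idxs (off + 1) xs

-- max over gaps of the boundary list a :: bs ++ [e]
def G : Int → List Int → Int → Int
  | a, [], e => e - a - 1
  | a, b :: bs, e => max (b - a - 1) (G b bs e)

-- the gap list itself
def GapL : Int → List Int → Int → List Int
  | a, [], e => [e - a - 1]
  | a, b :: bs, e => (b - a - 1) :: GapL b bs e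

theorem if_gt_eq_max (l m : Int) : (if l > m then l else m) = max l m := by
  split_ifs with h <;> omega

theorem loopA_eq (nota : List Int) :
    ∀ n i, nota.length - i = n →
      ∀ inicio final longitud max_inicio max_longitud,
        rachaLoopA nota i inicio final longitud max_inicio max_longitud
          = gRun (nota.drop i) longitud max_longitud := by
  intro n
  induction n with
  | zero =>
      intro i hi inicio final l mi m
      have h : ¬ i < nota.length := by omega
      rw [rachaLoopA, dif_neg h, List.drop_eq_nil_of_le (by omega)]
      rfl
  | succ k ih =>
      intro i hi inicio final l mi m
      have h : i < nota.length := by omega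
      have hdrop : nota.drop i = nota[i] :: nota.drop (i + 1) :=
        List.drop_eq_getElem_cons h
      rw [rachaLoopA, dif_pos h, hdrop]
      simp only [gRun]
      by_cases hx : nota[i] ≥ 5
      · rw [if_pos hx, if_pos hx]
        exact ih (i + 1) (by omega) _ _ _ _ _
      · rw [if_neg hx, if_neg hx]
        by_cases hl : l > m
        · rw [if_pos hl, if_pos hl, ih (i + 1) (by omega)]
        · rw [if_neg hl, if_neg hl, ih (i + 1) (by omega)]

theorem enum_filterMap (xs : List Int) :
    ∀ s : Int, (PySem.List.enumerate xs s).filterMap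
        (fun p => if p.2 < 5 then some p.1 else none) = idxs s xs := by
  induction xs with
  | nil => intro s; simp [PySem.List.enumerate_nil, idxs]
  | cons x xs ih =>
      intro s
      rw [PySem.List.enumerate_cons, List.filterMap_cons]
      by_cases hx : x < 5
      · simp only [hx, if_pos, idxs, ih]
      · simp only [hx, idxs, ih]; rfl

theorem zip_map_eq_GapL : ∀ (bs : List Int) (a e : Int),
    ((a :: (bs ++ [e])).zip (bs ++ [e])).map (fun p => p.2 - p.1 - 1) = GapL a bs e := by
  intro bs
  induction bs with
  | nil => intro a e; simp [GapL]
  | cons b bs ih => intro a e; simp only [List.cons_append, List.zip_cons_cons, List.map_cons, GapL, ih]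

theorem foldl_max_GapL : ∀ (bs : List Int) (b e x : Int),
    (GapL b bs e).foldl max x = max x (G b bs e) := by
  intro bs
  induction bs with
  | nil => intro b e x; simp [GapL, G]
  | cons c bs ih =>
      intro b e x
      show (GapL b (c :: bs) e).foldl max x = _
      rw [GapL, List.foldl_cons, ih, G, ← max_assoc]

theorem matchGapL_eq_G : ∀ (bs : List Int) (a e : Int),
    (match GapL a bs e with
     | [] => (0 : Int)
     | g :: gs => gs.foldl max g) = G a bs e := by
  intro bs a e
  cases bs with
  | nil => simp [GapL, G]
  | cons b bs => show (GapL b bs e).foldl max (b - a - 1) = _; rw [foldl_max_GapL, G]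

theorem G_nonneg : ∀ (xs : List Int) (off a : Int), a + 1 ≤ off →
    0 ≤ G a (idxs off xs) (off + xs.length) := by
  intro xs
  induction xs with
  | nil => intro off a h; simp only [idxs, G]; omega
  | cons x xs ih =>
      intro off a h
      rw [idxs]
      by_cases hx : x < 5
      · rw [if_pos hx]
        have := ih (off + 1) off (by omega)
        rw [G]
        have harith : (off + 1) + (xs.length : Int) = off + ((x :: xs).length : Int) := by
          simp; omega
        rw [harith] at this
        omega
      · rw [if_neg hx]
        have := ih (off + 1) a (by omega)
        have harith : (off + 1) + (xs.length : Int) = off + ((x :: xs).length : Int) := by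
          simp; omega
        rw [harith] at this
        exact this

theorem main_gap (xs : List Int) : ∀ (off a m : Int),
    max m (G a (idxs off xs) (off + xs.length)) = gRun xs (off - a - 1) m := by
  induction xs with
  | nil =>
      intro off a m
      simp only [idxs, G, gRun, List.length_nil, Int.natCast_zero, add_zero, if_gt_eq_max]
      omega
  | cons x xs ih =>
      intro off a m
      have harith : off + ((x :: xs).length : Int) = (off + 1) + (xs.length : Int) := by
        simp; omega
      rw [idxs, harith]
      by_cases hx : x < 5
      · rw [if_pos hx, G]
        have h1 := ih (off + 1) off (max (off - a - 1) m)
        have h0 : (off + 1) - off - 1 = (0 : Int) := by omega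
        rw [h0] at h1
        rw [gRun, if_neg (by omega : ¬ x ≥ 5), if_gt_eq_max]
        omega
      · rw [if_neg hx, ih (off + 1) a m, gRun, if_pos (by omega : x ≥ 5)]
        have : (off + 1) - a - 1 = (off - a - 1) + 1 := by omega
        rw [this]

theorem A_eq_gRun (nota : List Int) : racha_aprobados nota = gRun nota 0 0 := by
  have := loopA_eq nota (nota.length) 0 (by omega) 0 (-1) 0 (-1) 0
  simpa [racha_aprobados] using this

theorem B_eq_G (nota : List Int) :
    racha_aprobados_alt nota = G (-1) (idxs 0 nota) (nota.length : Int) := by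
  show (match ((-1 :: (((PySem.List.enumerate nota 0).filterMap
              (fun p => if p.2 < 5 then some p.1 else none)) ++ [(nota.length : Int)])).zip
          ((((PySem.List.enumerate nota 0).filterMap
              (fun p => if p.2 < 5 then some p.1 else none)) ++ [(nota.length : Int)]))).map
          (fun p => p.2 - p.1 - 1) with
        | [] => (0 : Int)
        | g :: gs => gs.foldl max g) = _
  rw [enum_filterMap nota 0, zip_map_eq_GapL, matchGapL_eq_G]

-- ===== VERDICT (by name: the statement is the Claim_ definition above) =====
theorem racha_aprobados_spec : Claim_equal_racha_aprobados := by
  intro nota _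
  show racha_aprobados nota = racha_aprobados_alt nota
  rw [A_eq_gRun, B_eq_G]
  have hnn : 0 ≤ G (-1) (idxs 0 nota) ((0 : Int) + nota.length) :=
    G_nonneg nota 0 (-1) (by omega)
  have hm := main_gap nota 0 (-1) 0
  have h0 : (0 : Int) - (-1) - 1 = 0 := by omega
  rw [h0] at hm
  rw [zero_add] at hnn hm
  omega
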